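-- pv_equiv track=rewrite | github.com/dreadlordow/Softuni-Python-Advanced | Exams-solutions/List Pureness.py | best_list_pureness
-- ===== SOURCE A (Python) =====
-- def best_list_pureness(lst, K):
--     rotations = 0
--     best_rotation = 0
--     best_pureness = 0
--     for i in range(K+1):
--         current_pureness = 0
--         for idx in range(len(lst)):
--             current_pureness += (lst[idx] * idx)
--         if current_pureness > best_pureness:
--             best_pureness = current_pureness
--             best_rotation = rotations
--         last = lst.pop()
--         lst.insert(0, last)
--         rotations += 1
--     return f'Best pureness {best_pureness} after {best_rotation} rotations'
-- ===== SOURCE B (Python) =====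
-- def best_list_pureness(lst, K):
--     # Return-value equivalence only: A rotates lst in place K+1 times; B does not mutate lst.
--     n = len(lst)
--     total = sum(lst)
--     pureness = sum(v * i for i, v in enumerate(lst))
--     best_pureness = 0
--     best_rotation = 0
--     for r in range(min(K + 1, n)):
--         if pureness > best_pureness:
--             best_pureness = pureness
--             best_rotation = r
--         pureness += total - n * lst[n - 1 - r]
--     return f'Best pureness {best_pureness} after {best_rotation} rotations'
-- ===== Notes on version B (the rewrite author's own statement) =====
-- stated objective: faster
-- what changed: B computes the initial pureness and the list sum once, then updates the pureness of each successive rotation in O(1) (p += total - n*last) and stops after min(K+1, n) rotations, since rotations repeat with period n and a repeated value can never strictly improve the best; A recomputes the full dot product and physically rotates the list on every one of the K+1 iterations.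
import Mathlib
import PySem

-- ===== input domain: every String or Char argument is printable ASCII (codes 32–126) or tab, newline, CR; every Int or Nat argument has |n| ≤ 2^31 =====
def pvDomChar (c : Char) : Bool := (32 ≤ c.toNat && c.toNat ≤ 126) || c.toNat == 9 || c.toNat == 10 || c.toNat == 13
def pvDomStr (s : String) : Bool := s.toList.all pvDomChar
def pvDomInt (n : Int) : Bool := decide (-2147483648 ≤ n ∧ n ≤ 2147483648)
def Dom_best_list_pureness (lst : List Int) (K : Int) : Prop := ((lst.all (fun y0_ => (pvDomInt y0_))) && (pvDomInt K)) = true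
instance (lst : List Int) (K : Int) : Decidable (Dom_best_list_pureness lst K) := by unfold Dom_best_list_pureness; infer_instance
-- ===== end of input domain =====

-- B replaces A's per-rotation O(n) recomputation by an O(1) incremental pureness update and stops
-- after min(K+1, n) rotations (rotations are periodic); return-value equivalence only: A rotates
-- lst in place K+1 times, B does not mutate its argument.

-- ===== PORT A =====
-- inner loop: current_pureness += lst[idx] * idx  (idx always in range)
def pvPureA (l : List Int) : Int :=
  (PySem.List.pyRange 0 (PySem.List.len l)).foldl
    (fun c idx => c + PySem.List.pyGetD l idx 0 * idx) 0

-- one iteration of A's for-loop; state = (rotations, best_rotation, best_pureness, lst).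
-- In the `pop?` none-branch Python raises IndexError (excluded by Pre_); the port leaves the list unchanged.
def pvStepA : (Int × Int × Int × List Int) → Int → (Int × Int × Int × List Int)
  | (rotations, best_rotation, best_pureness, l), _ =>
    let cur := pvPureA l
    let bp := if cur > best_pureness then cur else best_pureness
    let br := if cur > best_pureness then rotations else best_rotation
    match PySem.List.pop? l with
    | none => (rotations + 1, br, bp, l)
    | some (last, rest) => (rotations + 1, br, bp, PySem.List.insert rest 0 last)

def best_list_pureness (lst : List Int) (K : Int) : String :=
  let s := (PySem.List.pyRange 0 (K + 1)).foldl pvStepA (0, 0, 0, lst)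
  "Best pureness " ++ PySem.Int.toStr s.2.2.1 ++ " after " ++ PySem.Int.toStr s.2.1 ++ " rotations"

-- ===== PORT B =====
-- one iteration of B's loop; state = (best_pureness, best_rotation, pureness).
def pvStepB (lst : List Int) (total n : Int) : (Int × Int × Int) → Int → (Int × Int × Int)
  | (best_pureness, best_rotation, p), r =>
    let bp := if p > best_pureness then p else best_pureness
    let br := if p > best_pureness then r else best_rotation
    (bp, br, p + total - n * PySem.List.pyGetD lst (n - 1 - r) 0)

def best_list_pureness_alt (lst : List Int) (K : Int) : String :=
  let n : Int := PySem.List.len lst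
  let total : Int := lst.sum
  let p0 : Int := (PySem.List.enumerate lst).foldl (fun a iv => a + iv.2 * iv.1) 0
  let s := (PySem.List.pyRange 0 (min (K + 1) n)).foldl (pvStepB lst total n) (0, 0, p0)
  "Best pureness " ++ PySem.Int.toStr s.1 ++ " after " ++ PySem.Int.toStr s.2.1 ++ " rotations"

-- ===== PRECONDITION & SPEC =====
-- Pre_ excludes only the inputs where A raises IndexError: an empty list with K ≥ 0 (lst.pop() on []).
def Pre_best_list_pureness (lst : List Int) (K : Int) : Prop := lst ≠ [] ∨ K < 0
instance (lst : List Int) (K : Int) : Decidable (Pre_best_list_pureness lst K) := by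
  unfold Pre_best_list_pureness; infer_instance

def pvWitness_best_list_pureness : List Int × Int := ([1, 2, -3], 4)

def Spec_best_list_pureness (lst : List Int) (K : Int) (out : String) : Prop := out = best_list_pureness_alt lst K
instance (lst : List Int) (K : Int) (out : String) : Decidable (Spec_best_list_pureness lst K out) := by unfold Spec_best_list_pureness; infer_instance

-- ===== CLAIM (what is proved, stated in full; the proofs are below) =====
def Claim_equal_best_list_pureness : Prop := ∀ (lst : List Int) (K : Int), Dom_best_list_pureness lst K → Pre_best_list_pureness lst K → Spec_best_list_pureness lst K (best_list_pureness lst K)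


-- ===== LEMMAS AND PROOFS =====

-- the list after r right-rotations of lst (for 0 ≤ r ≤ lst.length)
def pvL (lst : List Int) (r : Nat) : List Int :=
  lst.drop (lst.length - r) ++ lst.take (lst.length - r)

-- pureness of a list: Σ l[j]*j
def pvVal (l : List Int) : Int :=
  ((List.range l.length).map (fun j => l.getD j 0 * (j : Int))).sum

-- pureness after r right-rotations (any r, via periodicity)
def pvQ (lst : List Int) (r : Nat) : Int := pvVal (pvL lst (r % lst.length))

-- the (best_pureness, best_rotation) pair after examining rotations 0..m-1
def pvBest (lst : List Int) (m : Nat) : Int × Int :=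
  (List.range m).foldl
    (fun bb r => if pvQ lst r > bb.1 then (pvQ lst r, (r : Int)) else bb) (0, 0)

lemma pvMap_getD_range (l : List Int) :
    (List.range l.length).map (fun j => l.getD j 0) = l := by
  induction l with
  | nil => rfl
  | cons x t ih =>
    simp only [List.length_cons, List.range_succ_eq_map, List.map_cons, List.map_map]
    simpa [Function.comp_def] using ih

lemma pvVal_cons (x : Int) (l : List Int) : pvVal (x :: l) = pvVal l + l.sum := by
  simp only [pvVal, List.length_cons, List.range_succ_eq_map, List.map_cons, List.map_map,
    Function.comp_def, List.getD_cons_zero, List.getD_cons_succ, List.sum_cons]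
  have h : (fun (j : Nat) => l.getD j 0 * ((Nat.succ j : Nat) : Int))
      = fun j => l.getD j 0 * (j : Int) + l.getD j 0 := by
    funext j; push_cast [Nat.succ_eq_add_one]; ring
  rw [h, PySem.List.sum_map_add_int, pvMap_getD_range]
  ring

lemma pvVal_append_singleton (l : List Int) (x : Int) :
    pvVal (l ++ [x]) = pvVal l + x * l.length := by
  simp only [pvVal, List.length_append, List.length_cons, List.length_nil, List.range_succ,
    List.map_append, List.sum_append, List.map_cons, List.map_nil]
  have h1 : (List.range l.length).map (fun j => (l ++ [x]).getD j 0 * (j : Int))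
      = (List.range l.length).map (fun j => l.getD j 0 * (j : Int)) := by
    apply List.map_congr_left; intro a ha
    rw [List.getD_append _ _ _ _ (List.mem_range.mp ha)]
  have h2 : (l ++ [x]).getD l.length 0 = x := by
    rw [List.getD_eq_getElem?_getD, List.getElem?_concat_length]; rfl
  rw [h1, h2]
  simp only [List.sum_cons, List.sum_nil]
  ring

lemma pvL_zero (lst : List Int) : pvL lst 0 = lst := by
  simp [pvL]

lemma pvL_length (lst : List Int) (r : Nat) : (pvL lst r).length = lst.length := by
  simp [pvL]

lemma pvL_sum (lst : List Int) (r : Nat) : (pvL lst r).sum = lst.sum := by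
  rw [pvL, List.sum_append, add_comm, ← List.sum_append, List.take_append_drop]

lemma pvL_step (lst : List Int) (r : Nat) (hr : r < lst.length) :
    pvL lst r = (lst.drop (lst.length - r) ++ lst.take (lst.length - r - 1))
        ++ [lst.getD (lst.length - 1 - r) 0] ∧
      lst.getD (lst.length - 1 - r) 0 ::
        (lst.drop (lst.length - r) ++ lst.take (lst.length - r - 1)) = pvL lst (r + 1) := by
  obtain ⟨k, hk⟩ : ∃ k, lst.length - r = k + 1 := ⟨lst.length - r - 1, by omega⟩
  have hidx : k < lst.length := by omega
  have hgd : lst.getD (lst.length - 1 - r) 0 = lst[k] := by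
    rw [show lst.length - 1 - r = k from by omega, List.getD_eq_getElem?_getD,
      List.getElem?_eq_getElem hidx]; rfl
  have htake : lst.take (lst.length - r) = lst.take k ++ [lst[k]] := by
    rw [hk, List.take_add_one, List.getElem?_eq_getElem hidx]; rfl
  have hdrop : lst.drop k = lst[k] :: lst.drop (lst.length - r) := by
    rw [List.drop_eq_getElem_cons hidx, show k + 1 = lst.length - r from hk.symm]
  constructor
  · rw [hgd, show lst.length - r - 1 = k from by omega, pvL, htake, ← List.append_assoc]
  · rw [hgd, show lst.length - r - 1 = k from by omega, pvL,
      show lst.length - (r + 1) = k from by omega, hdrop, List.cons_append]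

lemma pvL_full (lst : List Int) : pvL lst lst.length = lst := by
  simp [pvL]

lemma pvL_succ_mod (lst : List Int) (h : lst ≠ []) (m : Nat) :
    pvL lst ((m + 1) % lst.length) = pvL lst (m % lst.length + 1) := by
  have hn : 0 < lst.length := List.length_pos_of_ne_nil h
  have key : (m + 1) % lst.length = (m % lst.length + 1) % lst.length :=
    (Nat.mod_add_mod m lst.length 1).symm
  have hmlt : m % lst.length < lst.length := Nat.mod_lt m hn
  rcases Nat.lt_or_ge (m % lst.length + 1) lst.length with hlt | hge
  · rw [key, Nat.mod_eq_of_lt hlt]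
  · have h1 : m % lst.length + 1 = lst.length := by omega
    rw [key, h1, Nat.mod_self, pvL_zero, pvL_full]

lemma pvQ_rec (lst : List Int) (r : Nat) (hr : r < lst.length) :
    pvQ lst (r + 1) = pvQ lst r + lst.sum - lst.length * lst.getD (lst.length - 1 - r) 0 := by
  have h : lst ≠ [] := by intro h; subst h; simp at hr
  obtain ⟨heq, hcons⟩ := pvL_step lst r hr
  have hrmod : r % lst.length = r := Nat.mod_eq_of_lt hr
  have hlen : (lst.drop (lst.length - r) ++ lst.take (lst.length - r - 1)).length + 1
      = lst.length := by
    have := pvL_length lst r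
    rw [heq] at this; simpa using this
  calc pvQ lst (r + 1) = pvVal (pvL lst (r + 1)) := by
        rw [pvQ, pvL_succ_mod lst h r, hrmod]
    _ = pvVal (lst.getD (lst.length - 1 - r) 0 ::
          (lst.drop (lst.length - r) ++ lst.take (lst.length - r - 1))) := by
        rw [← hcons]
    _ = pvQ lst r + lst.sum - lst.length * lst.getD (lst.length - 1 - r) 0 := by
        rw [pvVal_cons, pvQ, hrmod, heq, pvVal_append_singleton]
        have hsum := pvL_sum lst r
        rw [heq, List.sum_append] at hsum
        simp only [List.sum_cons, List.sum_nil, add_zero] at hsum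
        have hlen' : ((lst.drop (lst.length - r) ++ lst.take (lst.length - r - 1)).length : Int)
            = (lst.length : Int) - 1 := by omega
        rw [hlen']
        have : (lst.drop (lst.length - r) ++ lst.take (lst.length - r - 1)).sum
            = lst.sum - lst.getD (lst.length - 1 - r) 0 := by omega
        rw [this]; ring

lemma pvPureA_eq (l : List Int) : pvPureA l = pvVal l := by
  rw [pvPureA, PySem.List.pyRange_one]
  have hlen : ((PySem.List.len l : Int) - 0).toNat = l.length := by
    simp [PySem.List.len_eq]
  rw [hlen, List.foldl_map]
  simp only [zero_add, PySem.List.pyGetD_natCast]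
  rw [PySem.List.foldl_add (List.range l.length) (fun k => l.getD k 0 * (k : Int)) 0]
  simp [pvVal]

lemma pvFoldl_stepA (l : List Int) : ∀ (s : Int × Int × Int × List Int),
    l.foldl pvStepA s = (fun t => pvStepA t 0)^[l.length] s := by
  induction l with
  | nil => intro s; rfl
  | cons x t ih =>
    intro s
    rw [List.foldl_cons, List.length_cons, Function.iterate_succ_apply, ih]
    rcases s with ⟨a, b, c, d⟩; rfl

lemma pvBest_succ (lst : List Int) (m : Nat) :
    pvBest lst (m + 1) =
      if pvQ lst m > (pvBest lst m).1 then (pvQ lst m, (m : Int)) else pvBest lst m := by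
  rw [pvBest, List.range_succ, List.foldl_append]; rfl

lemma pvA_invariant (lst : List Int) (h : lst ≠ []) : ∀ (m : Nat),
    (fun t => pvStepA t 0)^[m] (0, 0, 0, lst) =
      ((m : Int), (pvBest lst m).2, (pvBest lst m).1, pvL lst (m % lst.length)) := by
  have hn : 0 < lst.length := List.length_pos_of_ne_nil h
  intro m
  induction m with
  | zero => simp [pvBest, pvL_zero, Nat.zero_mod]
  | succ m ih =>
    rw [Function.iterate_succ_apply', ih]
    have hcur : pvPureA (pvL lst (m % lst.length)) = pvQ lst m := by
      rw [pvPureA_eq]; rfl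
    obtain ⟨heq, hcons⟩ := pvL_step lst (m % lst.length) (Nat.mod_lt m hn)
    have hpop : PySem.List.pop? (pvL lst (m % lst.length))
        = some (lst.getD (lst.length - 1 - m % lst.length) 0,
            lst.drop (lst.length - m % lst.length)
              ++ lst.take (lst.length - m % lst.length - 1)) := by
      rw [heq, PySem.List.pop?_last]
    show pvStepA (_, _, _, _) 0 = _
    rw [pvStepA]
    simp only [hcur, hpop, PySem.List.insert_zero, hcons, pvL_succ_mod lst h m,
      pvBest_succ lst m]
    split_ifs <;> simp

lemma pvP0_eq (lst : List Int) :
    (PySem.List.enumerate lst).foldl (fun a iv => a + iv.2 * iv.1) 0 = pvVal lst := by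
  rw [PySem.List.enumerate_eq_map_pyRange lst 0, List.foldl_map, PySem.List.pyRange_one]
  have hlen : ((PySem.List.len lst : Int) - 0).toNat = lst.length := by
    simp [PySem.List.len_eq]
  rw [hlen, List.foldl_map]
  simp only [zero_add, PySem.List.pyGetD_natCast]
  rw [PySem.List.foldl_add (List.range lst.length) (fun k => lst.getD k 0 * (k : Int)) 0]
  simp [pvVal]

lemma pvB_invariant (lst : List Int) : ∀ (m : Nat), m ≤ lst.length →
    (List.range m).foldl
        (fun st k => pvStepB lst lst.sum (lst.length : Int) st ((k : Nat) : Int))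
        (0, 0, pvVal lst)
      = ((pvBest lst m).1, (pvBest lst m).2, pvQ lst m) := by
  intro m
  induction m with
  | zero =>
    intro _
    simp [pvBest, pvQ, Nat.zero_mod, pvL_zero]
  | succ m ih =>
    intro hm
    have hmlt : m < lst.length := by omega
    rw [List.range_succ, List.foldl_append, ih (by omega), List.foldl_cons, List.foldl_nil]
    simp only [pvStepB]
    have hidx : (lst.length : Int) - 1 - (m : Int) = ((lst.length - 1 - m : Nat) : Int) := by
      omega
    rw [hidx, PySem.List.pyGetD_natCast]
    have hq : pvQ lst m + lst.sum - (lst.length : Int) * lst.getD (lst.length - 1 - m) 0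
        = pvQ lst (m + 1) := by
      rw [pvQ_rec lst m hmlt]
    rw [pvBest_succ lst m, hq]
    split_ifs with hc <;> rfl

lemma pvBest_ge (lst : List Int) : ∀ (m : Nat),
    0 ≤ (pvBest lst m).1 ∧ ∀ j, j < m → pvQ lst j ≤ (pvBest lst m).1 := by
  intro m
  induction m with
  | zero => exact ⟨le_refl 0, fun j hj => absurd hj (Nat.not_lt_zero j)⟩
  | succ m ih =>
    rw [pvBest_succ]
    split_ifs with hc
    · refine ⟨by omega, fun j hj => ?_⟩
      rcases Nat.lt_or_ge j m with hjm | hjm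
      · have := ih.2 j hjm; simp only []; omega
      · have : j = m := by omega
        subst this; simp
    · refine ⟨ih.1, fun j hj => ?_⟩
      rcases Nat.lt_or_ge j m with hjm | hjm
      · exact ih.2 j hjm
      · have : j = m := by omega
        subst this; omega

lemma pvQ_mod (lst : List Int) (m : Nat) : pvQ lst m = pvQ lst (m % lst.length) := by
  rw [pvQ, pvQ, Nat.mod_mod_of_dvd m (dvd_refl lst.length)]

lemma pvBest_stable (lst : List Int) (h : lst ≠ []) : ∀ (m : Nat), lst.length ≤ m →
    pvBest lst m = pvBest lst lst.length := by
  have hn : 0 < lst.length := List.length_pos_of_ne_nil h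
  intro m
  induction m with
  | zero => intro hm; omega
  | succ m ih =>
    intro hm
    rcases Nat.lt_or_ge m lst.length with hlt | hge
    · have : m + 1 = lst.length := by omega
      rw [this]
    · rw [pvBest_succ]
      have hq : pvQ lst m = pvQ lst (m % lst.length) := pvQ_mod lst m
      have hlt' : m % lst.length < m := Nat.lt_of_lt_of_le (Nat.mod_lt m hn) hge
      have := (pvBest_ge lst m).2 (m % lst.length) hlt'
      rw [if_neg (by omega), ih hge]

-- ===== VERDICT (by name: the statement is the Claim_ definition above) =====
theorem best_list_pureness_spec : Claim_equal_best_list_pureness := by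
  intro lst K _ hPre
  unfold Spec_best_list_pureness
  simp only [best_list_pureness, best_list_pureness_alt, PySem.List.len_eq]
  rcases Int.lt_or_le K 0 with hK | hK
  · -- K < 0: both ranges are empty
    have h1 : PySem.List.pyRange 0 (K + 1) = [] := PySem.List.pyRange_one_eq_nil (by omega)
    have h2 : PySem.List.pyRange 0 (min (K + 1) (lst.length : Int)) = [] :=
      PySem.List.pyRange_one_eq_nil (le_trans (min_le_left _ _) (by omega))
    rw [h1, h2]; rfl
  · -- K ≥ 0: lst ≠ [] by Pre_
    have h : lst ≠ [] := by
      rcases hPre with h | h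
      · exact h
      · omega
    have hn : 0 < lst.length := List.length_pos_of_ne_nil h
    rw [pvFoldl_stepA, PySem.List.length_pyRange_one,
      pvA_invariant lst h ((K + 1 - 0).toNat)]
    have hB : PySem.List.pyRange 0 (min (K + 1) (lst.length : Int))
        = (List.range (min (K + 1 - 0).toNat lst.length)).map (fun k : Nat => (k : Int)) := by
      rw [PySem.List.pyRange_one]
      simp only [zero_add]
      congr 1
      rcases le_total (K + 1) ((lst.length : Int)) with hm | hm
      · have h1 : (K + 1 - 0).toNat ≤ lst.length := by omega
        rw [min_eq_left hm, Nat.min_eq_left h1]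
      · have h1 : lst.length ≤ (K + 1 - 0).toNat := by omega
        rw [min_eq_right hm, Nat.min_eq_right h1]
        simp
    rw [hB, List.foldl_map, pvP0_eq,
      pvB_invariant lst (min (K + 1 - 0).toNat lst.length) (min_le_right _ _)]
    have hbb : pvBest lst ((K + 1 - 0).toNat)
        = pvBest lst (min (K + 1 - 0).toNat lst.length) := by
      rcases Nat.le_total ((K + 1 - 0).toNat) lst.length with hle | hge
      · rw [Nat.min_eq_left hle]
      · rw [Nat.min_eq_right hge, pvBest_stable lst h _ hge]
    rw [hbb]
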